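-- pv_equiv track=rewrite | github.com/triposat/Daily_Challenges | Number of distict Words with k maximum contiguous vowels - GFG/number-of-distict-words-with-k-maximum-contiguous-vowels.py | kvowelwords
-- ===== SOURCE A (Python) =====
-- def kvowelwords(n, k):
--     mod = 1000000007
--     dp = [[1]*(k+1) for _ in range(n+1)]
--     for i in range(1, n+1):
--         for j in range(0, k+1):
--             if j == 0:
--                 dp[i][j] = (21*dp[i-1][k]) % mod
--             else:
--                 dp[i][j] = (21*dp[i-1][k] % mod+5*dp[i-1][j-1] % mod) % mod
--     return dp[n][k]
-- ===== SOURCE B (Python) =====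
-- def kvowelwords(n, k):
--     mod = 1000000007
--     # f[i] = number of valid words of length i (== A's dp[i][k]); computed by the
--     # single linear recurrence  f(i) = 21*W(i-1) (+ 5^i while i <= k),  where
--     # W(i) = sum_{t=0}^{min(i,k)} 5^t * f(i-t) is maintained as a sliding window.
--     f = [1]
--     w = 1
--     p5 = 1
--     pk = pow(5, k, mod)
--     for i in range(1, n + 1):
--         p5 = 5 * p5 % mod
--         fi = 21 * w % mod
--         if i <= k:
--             fi = (fi + p5) % mod
--         f.append(fi)
--         w = (fi + 5 * w) % mod
--         if i > k:
--             w = (w - 5 * pk * f[i - 1 - k]) % mod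
--     return f[n]
-- ===== Notes on version B (the rewrite author's own statement) =====
-- stated objective: faster
-- what changed: Replaces A's (n+1)x(k+1) dynamic-programming table with a single 1-D linear recurrence on the word counts f(i), maintaining the weighted window sum W(i) = sum_{t<=min(i,k)} 5^t*f(i-t) incrementally, so each step is O(1) instead of O(k).
-- outside the precondition, e.g. on kvowelwords(3, -1): A raises IndexError, B returns 525; on kvowelwords(0, -5): A raises IndexError, B returns 1; on kvowelwords(-2, 2): A raises IndexError, B raises IndexError
import Mathlib
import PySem

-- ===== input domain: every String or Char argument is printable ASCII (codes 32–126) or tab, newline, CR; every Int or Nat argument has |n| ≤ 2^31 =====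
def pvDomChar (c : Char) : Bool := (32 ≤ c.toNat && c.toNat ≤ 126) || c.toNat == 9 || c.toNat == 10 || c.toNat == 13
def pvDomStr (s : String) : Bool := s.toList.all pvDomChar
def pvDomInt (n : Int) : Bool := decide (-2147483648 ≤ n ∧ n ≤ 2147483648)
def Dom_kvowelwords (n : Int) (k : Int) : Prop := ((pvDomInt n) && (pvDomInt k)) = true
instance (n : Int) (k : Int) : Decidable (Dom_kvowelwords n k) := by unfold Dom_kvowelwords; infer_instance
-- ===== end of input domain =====

-- B replaces A's O(n·k) row-by-row DP table by a single O(n+k) linear recurrence on the word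
-- counts, maintained with a sliding weighted window; equivalence is proved in ZMod 1000000007.


-- ===== PORT A =====
def kvowelwords (n : Int) (k : Int) : Int :=
  let md : Int := 1000000007
  let dp : List (List Int) :=
    (PySem.List.pyRange 0 (n+1) 1).map (fun _ => List.replicate (k+1).toNat 1)
  let dp :=
    (PySem.List.pyRange 1 (n+1) 1).foldl (fun dp i =>
      (PySem.List.pyRange 0 (k+1) 1).foldl (fun dp j =>
        let v : Int :=
          if j == 0 then
            PySem.Int.mod (21 * PySem.List.pyGetD (PySem.List.pyGetD dp (i-1) []) k 0) md
          else
            PySem.Int.mod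
              (PySem.Int.mod (21 * PySem.List.pyGetD (PySem.List.pyGetD dp (i-1) []) k 0) md
               + PySem.Int.mod (5 * PySem.List.pyGetD (PySem.List.pyGetD dp (i-1) []) (j-1) 0) md) md
        PySem.List.pySetD dp i (PySem.List.pySetD (PySem.List.pyGetD dp i []) j v))
        dp) dp
  PySem.List.pyGetD (PySem.List.pyGetD dp n []) k 0

-- ===== PORT B =====
def kvowelwords_alt (n : Int) (k : Int) : Int :=
  let md : Int := 1000000007
  -- pow(5, k, md): PySem.Int.powMod covers k ≥ 0; for k < 0 CPython computes with the
  -- modular inverse of 5, which mod 1000000007 is the constant 400000003 (exact there)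
  let pk : Int := if k < 0 then PySem.Int.powMod 400000003 (-k).toNat md
                  else PySem.Int.powMod 5 k.toNat md
  let st : List Int × Int × Int :=
    (PySem.List.pyRange 1 (n+1) 1).foldl (fun st i =>
      let f := st.1
      let w := st.2.1
      let p5 := PySem.Int.mod (5 * st.2.2) md
      let fi0 := PySem.Int.mod (21 * w) md
      let fi := if i ≤ k then PySem.Int.mod (fi0 + p5) md else fi0
      let f := f ++ [fi]
      let w1 := PySem.Int.mod (fi + 5 * w) md
      let w2 := if i > k then
          PySem.Int.mod (w1 - 5 * pk * PySem.List.pyGetD f (i-1-k) 0) md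
        else w1
      (f, w2, p5)) ([1], 1, 1)
  PySem.List.pyGetD st.1 n 0

-- ===== PRECONDITION & SPEC =====
-- Pre_ excludes exactly the inputs where Python A raises an IndexError (n < 0 or k < 0:
-- the dp table, or each of its rows, is empty and dp[n][k] / dp[i][j] goes out of range).
def Pre_kvowelwords (n : Int) (k : Int) : Prop := 0 ≤ n ∧ 0 ≤ k
instance (n : Int) (k : Int) : Decidable (Pre_kvowelwords n k) := by unfold Pre_kvowelwords; infer_instance
def pvWitness_kvowelwords : Int × Int := (3, 2)

def Spec_kvowelwords (n : Int) (k : Int) (out : Int) : Prop := out = kvowelwords_alt n k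
instance (n : Int) (k : Int) (out : Int) : Decidable (Spec_kvowelwords n k out) := by unfold Spec_kvowelwords; infer_instance

-- ===== CLAIM (what is proved, stated in full; the proofs are below) =====
def Claim_equal_kvowelwords : Prop := ∀ (n : Int) (k : Int), Dom_kvowelwords n k → Pre_kvowelwords n k → Spec_kvowelwords n k (kvowelwords n k)

-- ===== LEMMAS AND PROOFS =====

-- the value A's inner loop writes into column j of row i, given row i-1 (`prev`)
def pvVal (m : Nat) (prev : List Int) (j : Nat) : Int :=
  if j = 0 then PySem.Int.mod (21 * prev.getD (m-1) 0) 1000000007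
  else PySem.Int.mod (PySem.Int.mod (21 * prev.getD (m-1) 0) 1000000007
        + PySem.Int.mod (5 * prev.getD (j-1) 0) 1000000007) 1000000007

def pvStep (m : Nat) (prev : List Int) : List Int := (List.range m).map (pvVal m prev)

def pvRows (m : Nat) : Nat → List Int
  | 0 => List.replicate m 1
  | i+1 => pvStep m (pvRows m i)

-- A's computation, re-indexed over Nat
def pvANat (N m : Nat) : Int :=
  (((List.range N).foldl (fun dp r =>
      (List.range m).foldl (fun dp jn =>
        dp.set (r+1) ((dp.getD (r+1) []).set jn (pvVal m (dp.getD r []) jn))) dp)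
      (List.replicate (N+1) (List.replicate m 1))).getD N []).getD (m-1) 0

theorem pvCast_mod (x : Int) :
    ((PySem.Int.mod x 1000000007 : Int) : ZMod 1000000007) = (x : ZMod 1000000007) := by
  rw [PySem.Int.mod_eq_emod_of_pos (by norm_num)]
  have h : ((1000000007 : Int)) = ((1000000007 : Nat) : Int) := rfl
  rw [h, ZMod.intCast_mod]

theorem pvEq_of_cast (a b : Int) (h : (a : ZMod 1000000007) = b) (ha : 0 ≤ a)
    (ha' : a < 1000000007) (hb : 0 ≤ b) (hb' : b < 1000000007) : a = b := by
  have h2 := (ZMod.intCast_eq_intCast_iff' a b 1000000007).mp h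
  simpa [Int.emod_eq_of_lt ha (by exact_mod_cast ha'),
         Int.emod_eq_of_lt hb (by exact_mod_cast hb')] using h2

theorem pvBounds_rows (m : Nat) (i : Nat) :
    ∀ x ∈ pvRows m i, 0 ≤ x ∧ x < 1000000007 := by
  cases i with
  | zero =>
    intro x hx
    rw [pvRows] at hx
    have := List.eq_of_mem_replicate hx
    omega
  | succ i =>
    intro x hx
    rw [pvRows, pvStep] at hx
    obtain ⟨j, _, rfl⟩ := List.mem_map.mp hx
    rw [pvVal]
    split_ifs <;>
      exact ⟨PySem.Int.mod_nonneg _ (by norm_num), PySem.Int.mod_lt _ (by norm_num)⟩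

theorem pvLength_rows (m : Nat) (i : Nat) : (pvRows m i).length = m := by
  cases i with
  | zero => simp [pvRows]
  | succ i => simp [pvRows, pvStep]

theorem pvSet_map_range {α : Type} (q i : Nat) (f : Nat → α) (x : α) (_hi : i < q) :
    ((List.range q).map f).set i x = (List.range q).map (fun t => if t = i then x else f t) := by
  apply List.ext_getElem
  · simp
  · intro t h1 h2
    simp only [List.length_set, List.length_map, List.length_range] at h1
    rw [List.getElem_set]
    rcases eq_or_ne i t with h | h
    · simp [h]
    · simp [h, Ne.symm h]

theorem pvInner_fold (m : Nat) : ∀ (t : Nat), t ≤ m → ∀ (dp : List (List Int)) (I r : Nat),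
    r < I → I < dp.length → (dp.getD I []).length = m →
    (List.range t).foldl (fun dp jn =>
        dp.set I ((dp.getD I []).set jn (pvVal m (dp.getD r []) jn))) dp
      = dp.set I ((List.range t).map (pvVal m (dp.getD r [])) ++ (dp.getD I []).drop t) := by
  intro t
  induction t with
  | zero =>
    intro _ dp I r hrI hI hlen
    simp [List.set_getElem_self, List.getD, (List.getElem?_eq_getElem hI)]
  | succ t ih =>
    intro ht dp I r hrI hI hlen
    rw [List.range_succ, List.foldl_append, List.foldl_cons, List.foldl_nil,
        ih (by omega) dp I r hrI hI hlen]
    have hgr : ((dp.set I ((List.range t).map (pvVal m (dp.getD r [])) ++ (dp.getD I []).drop t)).getD r []) = dp.getD r [] := by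
      simp [List.getD, ne_of_gt hrI]
    have hgI : ((dp.set I ((List.range t).map (pvVal m (dp.getD r [])) ++ (dp.getD I []).drop t)).getD I []) = (List.range t).map (pvVal m (dp.getD r [])) ++ (dp.getD I []).drop t := by
      simp [List.getD, hI]
    rw [hgr, hgI, List.set_set]
    congr 1
    have hlt : t < (dp.getD I []).length := by omega
    have hset : ((List.range t).map (pvVal m (dp.getD r [])) ++ (dp.getD I []).drop t).set t (pvVal m (dp.getD r []) t)
        = (List.range t).map (pvVal m (dp.getD r [])) ++ ((dp.getD I []).drop t).set 0 (pvVal m (dp.getD r []) t) := by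
      have : t = ((List.range t).map (pvVal m (dp.getD r []))).length := by simp
      rw [this]
      simp
    rw [hset, List.drop_eq_getElem_cons hlt, List.set_cons_zero]
    simp

theorem pvOuter_inv (N m : Nat) (_hm : 1 ≤ m) : ∀ (r : Nat), r ≤ N →
    (List.range r).foldl (fun dp r =>
      (List.range m).foldl (fun dp jn =>
        dp.set (r+1) ((dp.getD (r+1) []).set jn (pvVal m (dp.getD r []) jn))) dp)
      (List.replicate (N+1) (List.replicate m 1))
    = (List.range (N+1)).map (fun t => if t ≤ r then pvRows m t else List.replicate m 1) := by
  intro r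
  induction r with
  | zero =>
    intro _
    rw [List.range_zero, List.foldl_nil]
    apply List.ext_getElem
    · simp
    · intro t h1 h2
      simp only [List.length_replicate] at h1
      rw [List.getElem_replicate, List.getElem_map, List.getElem_range]
      split_ifs with h
      · have : t = 0 := by omega
        subst this
        rfl
      · rfl
  | succ r ih =>
    intro hr
    rw [List.range_succ, List.foldl_append, List.foldl_cons, List.foldl_nil, ih (by omega)]
    set prev := (List.range (N+1)).map (fun t => if t ≤ r then pvRows m t else List.replicate m 1) with hprev
    have hlenprev : prev.length = N + 1 := by simp [hprev]
    have hrowI : prev.getD (r+1) [] = List.replicate m 1 := by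
      rw [hprev, PySem.List.getD_map_range _ _ _ _ (by omega), if_neg (by omega)]
    have hrowr : prev.getD r [] = pvRows m r := by
      rw [hprev, PySem.List.getD_map_range _ _ _ _ (by omega), if_pos (by omega)]
    rw [pvInner_fold m m (le_refl m) prev (r+1) r (by omega) (by omega) (by rw [hrowI]; simp)]
    rw [hrowI, hrowr, List.drop_replicate]
    simp only [Nat.sub_self, List.replicate_zero, List.append_nil]
    have hstep : (List.range m).map (pvVal m (pvRows m r)) = pvRows m (r+1) := rfl
    rw [hstep, hprev, pvSet_map_range _ _ _ _ (by omega)]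
    apply List.map_congr_left
    intro t ht
    rcases Nat.lt_or_ge t (r+1) with h | h
    · rw [if_neg (by omega), if_pos (by omega), if_pos (by omega)]
    · rcases eq_or_ne t (r+1) with he | he
      · subst he
        rw [if_pos rfl, if_pos (by omega)]
      · rw [if_neg he, if_neg (by omega), if_neg (by omega)]

theorem pvANat_rows (N m : Nat) (hm : 1 ≤ m) :
    pvANat N m = (pvRows m N).getD (m-1) 0 := by
  rw [pvANat, pvOuter_inv N m hm N (le_refl N),
      PySem.List.getD_map_range _ _ _ _ (by omega), if_pos (le_refl N)]

theorem pvA_norm (n k : Int) (hn : 0 ≤ n) (hk : 0 ≤ k) :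
    kvowelwords n k = pvANat n.toNat (k+1).toNat := by
  obtain ⟨N, rfl⟩ : ∃ N : Nat, n = (N:Int) := ⟨n.toNat, by omega⟩
  obtain ⟨m', rfl⟩ : ∃ m' : Nat, k = (m':Int) := ⟨k.toNat, by omega⟩
  have hmm : ((m':Int)+1).toNat = m' + 1 := by omega
  have hNN : ((N:Int)).toNat = N := by omega
  have h1 : PySem.List.pyRange 1 ((N:Int)+1) 1 = (List.range N).map (fun r : Nat => (1:Int) + r) := by
    rw [PySem.List.pyRange_one, show (((N:Int)+1)-1).toNat = N by omega]
  have h2 : PySem.List.pyRange 0 ((m':Int)+1) 1 = (List.range (m'+1)).map (fun t : Nat => (t:Int)) := by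
    rw [PySem.List.pyRange_one, show (((m':Int)+1)-0).toNat = m'+1 by omega]
    exact List.map_congr_left (fun t _ => by simp)
  have h0 : (PySem.List.pyRange 0 ((N:Int)+1) 1).map (fun _ => List.replicate (m'+1) (1:Int)) = List.replicate (N+1) (List.replicate (m'+1) 1) := by
    rw [List.map_const', PySem.List.length_pyRange_one, show (((N:Int)+1)-0).toNat = N+1 by omega]
  have hval : ∀ (prev : List Int) (jn : Nat),
      (if ((jn:Int) == 0) = true then
         PySem.Int.mod (21 * prev.getD m' 0) 1000000007
       else
         PySem.Int.mod
           (PySem.Int.mod (21 * prev.getD m' 0) 1000000007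
            + PySem.Int.mod (5 * PySem.List.pyGetD prev ((jn:Int)-1) 0) 1000000007) 1000000007)
      = pvVal (m'+1) prev jn := by
    intro prev jn
    rcases Nat.eq_zero_or_pos jn with h | h
    · subst h
      simp [pvVal]
    · rw [if_neg (by simp; omega), pvVal, if_neg (by omega),
          show ((jn:Int) - 1) = ((jn - 1 : Nat) : Int) by omega]
      simp
  rw [kvowelwords, pvANat, hNN, hmm, h0, h1, h2]
  simp only [List.foldl_map]
  simp only [PySem.List.pyGetD_natCast, PySem.List.pySetD_natCast,
    show ∀ r : Nat, (1:Int) + (r:Int) = (((r+1:Nat)):Int) from fun r => by omega,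
    show ∀ r : Nat, (((r+1:Nat)):Int) - 1 = ((r:Nat):Int) from fun r => by omega,
    PySem.List.pyGetD_natCast, hval, Nat.add_sub_cancel]


-- B's loop, as a recursion on the iteration count (k' = k.toNat; state (f, w, p5))
def pvStB (k' : Nat) : Nat → (List Int × Int × Int)
  | 0 => ([1], 1, 1)
  | r+1 =>
      let st := pvStB k' r
      let p5 := PySem.Int.mod (5 * st.2.2) 1000000007
      let fi0 := PySem.Int.mod (21 * st.2.1) 1000000007
      let fi := if r+1 ≤ k' then PySem.Int.mod (fi0 + p5) 1000000007 else fi0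
      let f := st.1 ++ [fi]
      let w1 := PySem.Int.mod (fi + 5 * st.2.1) 1000000007
      let w2 := if k' < r+1 then
          PySem.Int.mod (w1 - 5 * PySem.Int.powMod 5 k' 1000000007 * f.getD (r - k') 0) 1000000007
        else w1
      (f, w2, p5)

-- ZMod views of A's table: entry, last column (the word counts), sliding window sum
def pvG (m i j : Nat) : ZMod 1000000007 := (((pvRows m i).getD j 0 : Int) : ZMod 1000000007)
def pvF (m i : Nat) : ZMod 1000000007 := pvG m i (m-1)
def pvW (m i : Nat) : ZMod 1000000007 :=
  ∑ t ∈ Finset.range (min m (i+1)), 5^t * pvF m (i-t)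

theorem pvB_norm (n k : Int) (hn : 0 ≤ n) (hk : 0 ≤ k) :
    kvowelwords_alt n k = (pvStB k.toNat n.toNat).1.getD n.toNat 0 := by
  obtain ⟨N, rfl⟩ : ∃ N : Nat, n = (N:Int) := ⟨n.toNat, by omega⟩
  obtain ⟨m', rfl⟩ : ∃ m' : Nat, k = (m':Int) := ⟨k.toNat, by omega⟩
  have hmm : ((m':Int)).toNat = m' := by omega
  have hNN : ((N:Int)).toNat = N := by omega
  have h1 : PySem.List.pyRange 1 ((N:Int)+1) 1 = (List.range N).map (fun r : Nat => (1:Int) + r) := by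
    rw [PySem.List.pyRange_one, show (((N:Int)+1)-1).toNat = N by omega]
  have hif : ∀ (f : List Int) (w1 : Int) (r : Nat),
      (if ((m':Int) < ((r+1:Nat):Int)) then
          PySem.Int.mod (w1 - 5 * PySem.Int.powMod 5 m' 1000000007
            * PySem.List.pyGetD f (((r+1:Nat):Int) - 1 - (m':Int)) 0) 1000000007
        else w1)
      = (if m' < r+1 then
          PySem.Int.mod (w1 - 5 * PySem.Int.powMod 5 m' 1000000007 * f.getD (r - m') 0) 1000000007
        else w1) := by
    intro f w1 r
    by_cases hc : m' < r+1
    · rw [if_pos (by exact_mod_cast hc), if_pos hc,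
          show (((r+1:Nat)):Int) - 1 - (m':Int) = ((r - m' : Nat) : Int) by omega,
          PySem.List.pyGetD_natCast]
    · rw [if_neg (by exact_mod_cast hc), if_neg hc]
  rw [kvowelwords_alt, hmm, hNN, h1]
  simp only [show (((m':Nat):Int) < 0) = False from by simp, if_false]
  simp only [List.foldl_map,
    show ∀ r : Nat, (1:Int) + (r:Int) = (((r+1:Nat)):Int) from fun r => by omega,
    Nat.cast_le, hif, PySem.List.pyGetD_natCast]
  have hfold : ∀ M : Nat, (List.range M).foldl (fun (st : List Int × Int × Int) (r : Nat) =>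
      (st.1 ++ [if r+1 ≤ m' then
          PySem.Int.mod (PySem.Int.mod (21 * st.2.1) 1000000007
            + PySem.Int.mod (5 * st.2.2) 1000000007) 1000000007
        else PySem.Int.mod (21 * st.2.1) 1000000007],
       if m' < r+1 then
          PySem.Int.mod ((PySem.Int.mod ((if r+1 ≤ m' then
              PySem.Int.mod (PySem.Int.mod (21 * st.2.1) 1000000007
                + PySem.Int.mod (5 * st.2.2) 1000000007) 1000000007
            else PySem.Int.mod (21 * st.2.1) 1000000007) + 5 * st.2.1) 1000000007)
            - 5 * PySem.Int.powMod 5 m' 1000000007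
            * ((st.1 ++ [if r+1 ≤ m' then
                PySem.Int.mod (PySem.Int.mod (21 * st.2.1) 1000000007
                  + PySem.Int.mod (5 * st.2.2) 1000000007) 1000000007
              else PySem.Int.mod (21 * st.2.1) 1000000007]).getD (r - m') 0)) 1000000007
        else PySem.Int.mod ((if r+1 ≤ m' then
              PySem.Int.mod (PySem.Int.mod (21 * st.2.1) 1000000007
                + PySem.Int.mod (5 * st.2.2) 1000000007) 1000000007
            else PySem.Int.mod (21 * st.2.1) 1000000007) + 5 * st.2.1) 1000000007,
       PySem.Int.mod (5 * st.2.2) 1000000007)) ([1], 1, 1) = pvStB m' M := by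
    intro M
    induction M with
    | zero => rfl
    | succ M ih =>
      rw [List.range_succ, List.foldl_append, List.foldl_cons, List.foldl_nil, ih]
      rfl
  rw [hfold]

theorem pvG_step (m : Nat) (i j : Nat) (hj : j < m) :
    pvG m (i+1) j = 21 * pvF m i + (if 1 ≤ j then 5 * pvG m i (j-1) else 0) := by
  show (((pvStep m (pvRows m i)).getD j 0 : Int) : ZMod 1000000007) = _
  rw [pvStep, PySem.List.getD_map_range _ m j 0 hj, pvVal]
  rcases Nat.eq_zero_or_pos j with h | h
  · subst h
    rw [if_pos rfl, if_neg (by omega), pvCast_mod, add_zero]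
    push_cast
    rfl
  · rw [if_neg (by omega), if_pos (show 1 ≤ j from h), pvCast_mod]
    push_cast [pvCast_mod]
    rfl

theorem pvG_unroll (m : Nat) (_hm : 1 ≤ m) : ∀ (i : Nat), ∀ j, j < m →
    pvG m i j = 21 * (∑ t ∈ Finset.range (min (j+1) i), 5^t * pvF m (i-1-t))
      + (if i ≤ j then (5:ZMod 1000000007)^i else 0) := by
  intro i
  induction i with
  | zero =>
    intro j hj
    rw [pvG]
    rw [show (pvRows m 0) = List.replicate m 1 from rfl,
        List.getD_eq_getElem _ _ (by simpa using hj), List.getElem_replicate]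
    simp
  | succ i ih =>
    intro j hj
    rw [pvG_step m i j hj]
    rcases Nat.eq_zero_or_pos j with h0 | h0
    · subst h0
      rw [if_neg (by omega), if_neg (by omega),
          show min (0+1) (i+1) = 1 by omega, Finset.sum_range_one]
      simp only [pow_zero, one_mul, add_zero, Nat.sub_zero, Nat.add_sub_cancel]
    · rw [if_pos (show 1 ≤ j from h0), ih (j-1) (by omega),
          show min (j+1) (i+1) = min j i + 1 by omega, Finset.sum_range_succ']
      simp only [show j - 1 + 1 = j from by omega]
      rw [show i+1-1-0 = i by omega, pow_zero, one_mul]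
      have hsum1 : ∑ t ∈ Finset.range (min j i), (5:ZMod 1000000007)^(t+1) * pvF m (i+1-1-(t+1))
          = 5 * ∑ t ∈ Finset.range (min j i), (5:ZMod 1000000007)^t * pvF m (i-1-t) := by
        rw [Finset.mul_sum]
        apply Finset.sum_congr rfl
        intro t _
        rw [show i+1-1-(t+1) = i-1-t by omega, pow_succ]
        ring
      rw [hsum1]
      have he : (5:ZMod 1000000007) * (if i ≤ j-1 then (5:ZMod 1000000007)^i else 0)
          = (if i+1 ≤ j then (5:ZMod 1000000007)^(i+1) else 0) := by
        by_cases hc : i + 1 ≤ j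
        · rw [if_pos hc, if_pos (show i ≤ j-1 by omega), pow_succ]
          ring
        · rw [if_neg hc, if_neg (show ¬ (i ≤ j-1) by omega)]
          ring
      rw [← he]
      ring

theorem pvF_identity (m : Nat) (hm : 1 ≤ m) (i : Nat) :
    pvF m (i+1) = 21 * pvW m i + (if i+1 ≤ m-1 then (5:ZMod 1000000007)^(i+1) else 0) := by
  have hs : ∑ t ∈ Finset.range (min m (i+1)), (5:ZMod 1000000007)^t * pvF m (i+1-1-t) = pvW m i := by
    rw [pvW]
    apply Finset.sum_congr rfl
    intro t _
    rw [show i+1-1-t = i-t by omega]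
  rw [pvF, pvG_unroll m hm (i+1) (m-1) (by omega), show m-1+1 = m by omega, hs]

theorem pvW_update (m : Nat) (hm : 1 ≤ m) (i : Nat) :
    pvW m (i+1) = pvF m (i+1) + 5 * pvW m i
      - (if m ≤ i+1 then (5:ZMod 1000000007)^m * pvF m (i+1-m) else 0) := by
  rw [pvW]
  rcases Nat.lt_or_ge (i+1) m with hc | hc
  · rw [show min m (i+1+1) = (i+1)+1 by omega, Finset.sum_range_succ',
        if_neg (by omega), sub_zero]
    have hs : ∑ t ∈ Finset.range (i+1), (5:ZMod 1000000007)^(t+1) * pvF m (i+1-(t+1)) = 5 * pvW m i := by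
      rw [pvW, show min m (i+1) = i+1 by omega, Finset.mul_sum]
      apply Finset.sum_congr rfl
      intro t _
      rw [show i+1-(t+1) = i-t by omega, pow_succ]
      ring
    rw [hs, show i+1-0 = i+1 by omega, pow_zero, one_mul]
    ring
  · rw [show min m (i+1+1) = (m-1)+1 by omega, Finset.sum_range_succ',
        if_pos (show m ≤ i+1 by omega)]
    have hw : pvW m i = (∑ t ∈ Finset.range (m-1), (5:ZMod 1000000007)^t * pvF m (i-t))
        + (5:ZMod 1000000007)^(m-1) * pvF m (i-(m-1)) := by
      have h2 := Finset.sum_range_succ (fun t => (5:ZMod 1000000007)^t * pvF m (i-t)) (m-1)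
      rw [show m-1+1 = m by omega] at h2
      rw [pvW, show min m (i+1) = m by omega, h2]
    have hsb : ∑ t ∈ Finset.range (m-1), (5:ZMod 1000000007)^(t+1) * pvF m (i+1-(t+1))
        = 5 * ∑ t ∈ Finset.range (m-1), (5:ZMod 1000000007)^t * pvF m (i-t) := by
      rw [Finset.mul_sum]
      apply Finset.sum_congr rfl
      intro t _
      rw [show i+1-(t+1) = i-t by omega, pow_succ]
      ring
    rw [hsb, show i+1-0 = i+1 by omega, pow_zero, one_mul, hw,
        show i-(m-1) = i+1-m by omega,
        show (5:ZMod 1000000007)^m = 5^(m-1)*5 by rw [← pow_succ, show m-1+1 = m by omega]]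
    ring

theorem pvF_zero (m : Nat) (hm : 1 ≤ m) : pvF m 0 = 1 := by
  rw [pvF, pvG, show pvRows m 0 = List.replicate m 1 from rfl,
      List.getD_eq_getElem _ _ (by simp; omega), List.getElem_replicate]
  norm_num

theorem pvW_zero (m : Nat) (hm : 1 ≤ m) : pvW m 0 = 1 := by
  rw [pvW, show min m 1 = 1 by omega, Finset.sum_range_one, pow_zero, one_mul,
      pvF_zero m hm]

theorem pvInvB (k' : Nat) : ∀ (i : Nat),
    (pvStB k' i).1.length = i + 1
  ∧ (∀ j, j ≤ i → (((pvStB k' i).1.getD j 0 : Int) : ZMod 1000000007) = pvF (k'+1) j)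
  ∧ (((pvStB k' i).2.1 : Int) : ZMod 1000000007) = pvW (k'+1) i
  ∧ (((pvStB k' i).2.2 : Int) : ZMod 1000000007) = (5:ZMod 1000000007)^i
  ∧ (∀ x ∈ (pvStB k' i).1, 0 ≤ x ∧ x < 1000000007) := by
  intro i
  induction i with
  | zero =>
    refine ⟨rfl, ?_, ?_, by rw [show ((pvStB k' 0).2.2) = 1 from rfl]; norm_num, ?_⟩
    · intro j hj
      interval_cases j
      rw [show ((pvStB k' 0).1.getD 0 0) = 1 from rfl, pvF_zero (k'+1) (by omega)]
      norm_num
    · rw [show ((pvStB k' 0).2.1) = 1 from rfl, pvW_zero (k'+1) (by omega)]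
      norm_num
    · intro x hx
      rw [show (pvStB k' 0).1 = [1] from rfl] at hx
      simp at hx
      omega
  | succ i ih =>
    obtain ⟨hlen, hf, hw, hp, hb⟩ := ih
    have hm : 1 ≤ k' + 1 := by omega
    -- names for the step's intermediate values
    set st := pvStB k' i with hst
    set p5' := PySem.Int.mod (5 * st.2.2) 1000000007 with hp5'
    set fi0 := PySem.Int.mod (21 * st.2.1) 1000000007 with hfi0
    set fi := if i+1 ≤ k' then PySem.Int.mod (fi0 + p5') 1000000007 else fi0 with hfi
    set f' := st.1 ++ [fi] with hf'
    set w1 := PySem.Int.mod (fi + 5 * st.2.1) 1000000007 with hw1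
    set w2 := if k' < i+1 then
        PySem.Int.mod (w1 - 5 * PySem.Int.powMod 5 k' 1000000007 * f'.getD (i - k') 0) 1000000007
      else w1 with hw2
    have hunf : pvStB k' (i+1) = (f', w2, p5') := rfl
    have hcp5 : ((p5' : Int) : ZMod 1000000007) = (5:ZMod 1000000007)^(i+1) := by
      rw [hp5', pvCast_mod]
      push_cast
      rw [hp, pow_succ]
      ring
    have hcfi : ((fi : Int) : ZMod 1000000007) = pvF (k'+1) (i+1) := by
      rw [pvF_identity (k'+1) hm i, show k'+1-1 = k' from by omega, hfi]
      by_cases hc : i+1 ≤ k'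
      · rw [if_pos hc, if_pos hc, pvCast_mod]
        push_cast
        rw [hfi0, pvCast_mod]
        push_cast
        rw [hw, hcp5]
      · rw [if_neg hc, if_neg hc, hfi0, pvCast_mod]
        push_cast
        rw [hw]
        ring
    have hgetD : ∀ j, j ≤ i+1 → ((f'.getD j 0 : Int) : ZMod 1000000007) = pvF (k'+1) j := by
      intro j hj
      rcases Nat.lt_or_ge j (i+1) with h | h
      · rw [hf', List.getD_append _ _ _ _ (by omega)]
        exact hf j (by omega)
      · have : j = i+1 := by omega
        subst this
        rw [hf', List.getD_eq_getElem _ _ (by simp [hlen]),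
            List.getElem_append_right (by omega)]
        simpa [hlen] using hcfi
    have hcw1 : ((w1 : Int) : ZMod 1000000007)
        = pvF (k'+1) (i+1) + 5 * pvW (k'+1) i := by
      rw [hw1, pvCast_mod]
      push_cast
      rw [hcfi, hw]
    have hcw2 : ((w2 : Int) : ZMod 1000000007) = pvW (k'+1) (i+1) := by
      rw [pvW_update (k'+1) hm i, hw2]
      by_cases hc : k' < i+1
      · rw [if_pos hc, if_pos (show k'+1 ≤ i+1 from by omega), pvCast_mod]
        push_cast
        rw [hcw1, show PySem.Int.powMod 5 k' 1000000007 = PySem.Int.mod ((5:Int)^k') 1000000007 from rfl,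
            pvCast_mod, hgetD (i - k') (by omega), show i - k' = i+1-(k'+1) from by omega]
        push_cast
        rw [pow_succ]
        ring
      · rw [if_neg hc, if_neg (show ¬ (k'+1 ≤ i+1) from by omega), sub_zero, hcw1]
    refine ⟨?_, hgetD, ?_, ?_, ?_⟩
    · rw [hunf, hf']
      simp [hlen]
    · rw [hunf]
      exact hcw2
    · rw [hunf]
      exact hcp5
    · rw [hunf, hf']
      intro x hx
      rcases List.mem_append.mp hx with h | h
      · exact hb x h
      · have hx1 : x = fi := by simpa using h
        subst hx1
        rw [hfi]
        split_ifs
        · exact ⟨PySem.Int.mod_nonneg _ (by norm_num), PySem.Int.mod_lt _ (by norm_num)⟩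
        · exact ⟨PySem.Int.mod_nonneg _ (by norm_num), PySem.Int.mod_lt _ (by norm_num)⟩

theorem pvMain (n k : Int) (hn : 0 ≤ n) (hk : 0 ≤ k) :
    kvowelwords n k = kvowelwords_alt n k := by
  have hm1 : 1 ≤ (k+1).toNat := by omega
  have hkk : (k+1).toNat = k.toNat + 1 := by omega
  set m := (k+1).toNat with hmdef
  set N := n.toNat with hNdef
  obtain ⟨hlen, hf, -, -, hb⟩ := pvInvB k.toNat N
  rw [pvA_norm n k hn hk, pvANat_rows N m hm1, pvB_norm n k hn hk]
  apply pvEq_of_cast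
  · rw [show ((((pvRows m N).getD (m-1) 0 : Int)) : ZMod 1000000007) = pvF m N from rfl,
        hf N (le_refl N)]
    congr 1
  · have hmem : (pvRows m N).getD (m-1) 0 ∈ pvRows m N := by
      rw [List.getD_eq_getElem _ _ (by rw [pvLength_rows]; omega)]
      exact List.getElem_mem _
    exact (pvBounds_rows m N _ hmem).1
  · have hmem : (pvRows m N).getD (m-1) 0 ∈ pvRows m N := by
      rw [List.getD_eq_getElem _ _ (by rw [pvLength_rows]; omega)]
      exact List.getElem_mem _
    exact (pvBounds_rows m N _ hmem).2
  · have hmem : (pvStB k.toNat N).1.getD N 0 ∈ (pvStB k.toNat N).1 := by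
      rw [List.getD_eq_getElem _ _ (by rw [hlen]; omega)]
      exact List.getElem_mem _
    exact (hb _ hmem).1
  · have hmem : (pvStB k.toNat N).1.getD N 0 ∈ (pvStB k.toNat N).1 := by
      rw [List.getD_eq_getElem _ _ (by rw [hlen]; omega)]
      exact List.getElem_mem _
    exact (hb _ hmem).2

-- ===== VERDICT (by name: the statement is the Claim_ definition above) =====
theorem kvowelwords_spec : Claim_equal_kvowelwords := by
  intro n k _ hpre
  exact pvMain n k hpre.1 hpre.2
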